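-- pv_equiv track=rewrite | github.com/VoyakinH/CG | lab_01/main.py | is_able_to_build
-- ===== SOURCE A (Python) =====
-- def is_able_to_build(arr):
--     for i in range(len(arr) - 2):
--         for j in range(i + 1, len(arr) - 1):
--             for k in range(j + 1, len(arr)):
--                 x1 = arr[i][0]; y1 = arr[i][1]
--                 x2 = arr[j][0]; y2 = arr[j][1]
--                 x3 = arr[k][0]; y3 = arr[k][1]
--                 if (x3 - x1) * (y2 - y1) != (y3 - y1) * (x2 - x1):
--                     return False
--     return True
-- ===== SOURCE B (Python) =====
-- def is_able_to_build(arr):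
--     if len(arr) < 3:
--         return True
--     x0 = arr[0][0]; y0 = arr[0][1]
--     d = None
--     for p in arr:
--         if p[0] != x0 or p[1] != y0:
--             d = (p[0] - x0, p[1] - y0)
--             break
--     if d is None:
--         return True
--     dx, dy = d
--     return all((p[0] - x0) * dy == (p[1] - y0) * dx for p in arr)
-- ===== Notes on version B (the rewrite author's own statement) =====
-- stated objective: faster
-- what changed: Replaced the O(n^3) all-triples collinearity test by a single pass: anchor at the first point, take the first point with different coordinates as direction, and check every point against that one line.
-- outside the precondition, e.g. on is_able_to_build([(0, 0), (1, 1), (1, 0), (5,)]): A returns False, B returns False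
import Mathlib
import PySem

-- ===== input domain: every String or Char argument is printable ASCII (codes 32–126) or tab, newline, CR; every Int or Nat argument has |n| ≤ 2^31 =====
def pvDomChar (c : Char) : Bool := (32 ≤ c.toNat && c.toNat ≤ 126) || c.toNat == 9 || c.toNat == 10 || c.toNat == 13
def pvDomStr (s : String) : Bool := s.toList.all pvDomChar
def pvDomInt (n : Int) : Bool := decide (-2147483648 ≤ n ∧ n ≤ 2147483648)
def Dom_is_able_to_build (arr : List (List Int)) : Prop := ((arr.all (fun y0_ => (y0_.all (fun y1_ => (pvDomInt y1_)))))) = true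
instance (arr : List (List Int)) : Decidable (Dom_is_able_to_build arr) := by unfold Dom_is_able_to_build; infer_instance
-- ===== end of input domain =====

-- B replaces A's O(n^3) all-triples collinearity scan by a single pass testing every
-- point against the line through the first point and the first point distinct from it.

-- ===== PORT A =====
-- p[0] / p[1] (Python raises IndexError on short points; total form used under Pre_)
def pvX (p : List Int) : Int := PySem.List.pyGetD p 0 0
def pvY (p : List Int) : Int := PySem.List.pyGetD p 1 0

def is_able_to_build (arr : List (List Int)) : Bool :=
  (PySem.List.pyRange 0 ((arr.length : Int) - 2) 1).all (fun i =>
    (PySem.List.pyRange (i + 1) ((arr.length : Int) - 1) 1).all (fun j =>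
      (PySem.List.pyRange (j + 1) (arr.length : Int) 1).all (fun k =>
        let pi_ := PySem.List.pyGetD arr i []
        let pj_ := PySem.List.pyGetD arr j []
        let pk_ := PySem.List.pyGetD arr k []
        decide ((pvX pk_ - pvX pi_) * (pvY pj_ - pvY pi_) =
                (pvY pk_ - pvY pi_) * (pvX pj_ - pvX pi_)))))

-- ===== PORT B =====
-- the 'for p in arr: if …: d = …; break' loop of Source B
def pvFindDir (x0 y0 : Int) : List (List Int) → Option (Int × Int)
  | [] => none
  | p :: ps =>
    if pvX p ≠ x0 ∨ pvY p ≠ y0 then some (pvX p - x0, pvY p - y0)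
    else pvFindDir x0 y0 ps

def is_able_to_build_alt (arr : List (List Int)) : Bool :=
  if arr.length < 3 then true
  else
    let p0 := PySem.List.pyGetD arr 0 []
    let x0 := pvX p0
    let y0 := pvY p0
    match pvFindDir x0 y0 arr with
    | none => true
    | some (dx, dy) =>
        arr.all (fun p => decide ((pvX p - x0) * dy = (pvY p - y0) * dx))

-- ===== PRECONDITION & SPEC =====
-- Pre_ excludes lists of ≥3 points in which some point has fewer than 2 coordinates:
-- there Python A usually raises IndexError, and whether it instead returns False first
-- depends accidentally on whether a non-collinear triple precedes the short point.
def Pre_is_able_to_build (arr : List (List Int)) : Prop :=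
  arr.length < 3 ∨ ∀ p ∈ arr, 2 ≤ p.length
instance (arr : List (List Int)) : Decidable (Pre_is_able_to_build arr) := by
  unfold Pre_is_able_to_build; infer_instance

def pvWitness_is_able_to_build : List (List Int) := [[0, 0], [1, 1], [2, 2]]

def Spec_is_able_to_build (arr : List (List Int)) (out : Bool) : Prop := out = is_able_to_build_alt arr
instance (arr : List (List Int)) (out : Bool) : Decidable (Spec_is_able_to_build arr out) := by unfold Spec_is_able_to_build; infer_instance

-- ===== CLAIM (what is proved, stated in full; the proofs are below) =====
def Claim_equal_is_able_to_build : Prop := ∀ (arr : List (List Int)), Dom_is_able_to_build arr → Pre_is_able_to_build arr → Spec_is_able_to_build arr (is_able_to_build arr)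

-- ===== LEMMAS AND PROOFS =====

-- cross products with a common nonzero direction are pairwise proportional
lemma pv_parallel {a1 a2 b1 b2 dx dy : Int} (hd : dx ≠ 0 ∨ dy ≠ 0)
    (ha : a1 * dy = a2 * dx) (hb : b1 * dy = b2 * dx) : a1 * b2 = a2 * b1 := by
  by_cases hy : dy = 0
  · have hx : dx ≠ 0 := by tauto
    subst hy
    have ha2 : a2 = 0 := by
      rcases mul_eq_zero.mp (by linarith [ha] : a2 * dx = 0) with h | h
      · exact h
      · exact absurd h hx
    have hb2 : b2 = 0 := by
      rcases mul_eq_zero.mp (by linarith [hb] : b2 * dx = 0) with h | h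
      · exact h
      · exact absurd h hx
    simp [ha2, hb2]
  · apply mul_right_cancel₀ hy
    linear_combination b2 * ha - a2 * hb

-- characterisation of A's triple loop
lemma pv_A_iff (arr : List (List Int)) : is_able_to_build arr = true ↔
    ∀ i j k : Nat, i < j → j < k → k < arr.length →
      (pvX (arr.getD k []) - pvX (arr.getD i [])) * (pvY (arr.getD j []) - pvY (arr.getD i [])) =
      (pvY (arr.getD k []) - pvY (arr.getD i [])) * (pvX (arr.getD j []) - pvX (arr.getD i [])) := by
  simp only [is_able_to_build, List.all_eq_true, PySem.List.mem_pyRange_one, decide_eq_true_eq]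
  constructor
  · intro h i j k hij hjk hk
    have := h (i : Int) ⟨by omega, by omega⟩ (j : Int) ⟨by omega, by omega⟩
      (k : Int) ⟨by omega, by omega⟩
    simpa only [PySem.List.pyGetD_natCast] using this
  · intro h i hi j hj k hk
    have hi' : (0 : Int) ≤ i := hi.1
    have hj' : (0 : Int) ≤ j := by omega
    have hk' : (0 : Int) ≤ k := by omega
    have := h i.toNat j.toNat k.toNat (by omega) (by omega) (by omega)
    have ei : ((i.toNat : Int)) = i := by omega
    have ej : ((j.toNat : Int)) = j := by omega
    have ek : ((k.toNat : Int)) = k := by omega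
    rw [← ei, ← ej, ← ek]
    simpa only [PySem.List.pyGetD_natCast] using this

lemma pv_findDir_none (x0 y0 : Int) (l : List (List Int)) :
    pvFindDir x0 y0 l = none ↔ ∀ p ∈ l, pvX p = x0 ∧ pvY p = y0 := by
  induction l with
  | nil => simp [pvFindDir]
  | cons p ps ih =>
    simp only [pvFindDir]
    split_ifs with h
    · simp only [false_iff]
      intro hall
      rcases h with h | h
      · exact h (hall p (by simp)).1
      · exact h (hall p (by simp)).2
    · simp only [not_or, not_not] at h
      simp [ih, h]

lemma pv_findDir_some (x0 y0 dx dy : Int) (l : List (List Int))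
    (h : pvFindDir x0 y0 l = some (dx, dy)) :
    ∃ j, j < l.length ∧ dx = pvX (l.getD j []) - x0 ∧ dy = pvY (l.getD j []) - y0 ∧
      (pvX (l.getD j []) ≠ x0 ∨ pvY (l.getD j []) ≠ y0) ∧
      ∀ m, m < j → pvX (l.getD m []) = x0 ∧ pvY (l.getD m []) = y0 := by
  induction l with
  | nil => simp [pvFindDir] at h
  | cons p ps ih =>
    simp only [pvFindDir] at h
    split_ifs at h with hp
    · refine ⟨0, by simp, ?_, ?_, ?_, ?_⟩
      · simpa using congrArg Prod.fst (Option.some.inj h).symm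
      · simpa using congrArg Prod.snd (Option.some.inj h).symm
      · simpa using hp
      · intro m hm; omega
    · obtain ⟨j, hj, h1, h2, h3, h4⟩ := ih h
      simp only [not_or, not_not] at hp
      refine ⟨j + 1, by simpa using hj, by simpa using h1, by simpa using h2, by simpa using h3, ?_⟩
      intro m hm
      cases m with
      | zero => simpa using hp
      | succ m' => simpa using h4 m' (by omega)

-- membership in a list as indexing with getD
lemma pv_forall_mem_iff (arr : List (List Int)) (P : List Int → Prop) :
    (∀ p ∈ arr, P p) ↔ ∀ k, k < arr.length → P (arr.getD k []) := by
  constructor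
  · intro h k hk
    have hm : arr.getD k [] ∈ arr := by
      rw [List.getD_eq_getElem arr [] hk]
      exact List.getElem_mem hk
    exact h _ hm
  · intro h p hp
    obtain ⟨k, hk, rfl⟩ := List.getElem_of_mem hp
    have := h k hk
    rwa [List.getD_eq_getElem arr [] hk] at this

-- ===== VERDICT (by name: the statement is the Claim_ definition above) =====
theorem is_able_to_build_spec : Claim_equal_is_able_to_build := by
  intro arr _dom _pre
  unfold Spec_is_able_to_build is_able_to_build_alt
  by_cases hn : arr.length < 3
  · rw [if_pos hn]
    unfold is_able_to_build
    rw [PySem.List.pyRange_one_eq_nil (by omega)]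
    simp
  · rw [if_neg hn]
    simp only []
    have h00 : PySem.List.pyGetD arr (0 : Int) [] = arr.getD 0 [] := by
      simpa using PySem.List.pyGetD_natCast (xs := arr) (n := 0) (d := [])
    rw [h00]
    set x0 := pvX (arr.getD 0 []) with hx0
    set y0 := pvY (arr.getD 0 []) with hy0
    cases hfd : pvFindDir x0 y0 arr with
    | none =>
      have hall := (pv_findDir_none x0 y0 arr).mp hfd
      rw [pv_forall_mem_iff] at hall
      rw [pv_A_iff]
      intro i j k hij hjk hk
      have hi := hall i (by omega)
      have hj := hall j (by omega)
      have hk' := hall k hk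
      rw [hi.1, hi.2, hj.1, hj.2, hk'.1, hk'.2]
      ring
    | some d =>
      obtain ⟨dx, dy⟩ := d
      obtain ⟨j, hjlen, hdx, hdy, hne, hpre⟩ := pv_findDir_some x0 y0 dx dy arr hfd
      have hd0 : dx ≠ 0 ∨ dy ≠ 0 := by
        rcases hne with h | h
        · left; omega
        · right; omega
      have hj1 : 1 ≤ j := by
        by_contra h
        have hj0 : j = 0 := by omega
        subst hj0
        rcases hne with h' | h' <;> simp_all
      rw [Bool.eq_iff_iff, pv_A_iff, List.all_eq_true, pv_forall_mem_iff]
      constructor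
      · intro h k hk
        simp only [decide_eq_true_eq]
        rcases lt_trichotomy k j with hkj | hkj | hkj
        · have := hpre k hkj
          rw [this.1, this.2]
          ring
        · subst hkj
          rw [← hdx, ← hdy]
          ring
        · have htr := h 0 j k (by omega) hkj (by omega)
          rw [hdx, hdy]
          exact htr
      · intro h i j' k hij hjk hk
        have hu := h i (by omega)
        have hv := h j' (by omega)
        have hw := h k hk
        simp only [decide_eq_true_eq] at hu hv hw
        have huv := pv_parallel hd0 hv hu
        have huw := pv_parallel hd0 hw hu
        have hvw := pv_parallel hd0 hw hv
        linear_combination hvw - huw + huv
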